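-- pv_equiv track=rewrite | github.com/davijit868/Programming-Solutions | Data Structures/Trees/Special Distance Value.py | Solve
-- ===== SOURCE A (Python) =====
-- def cur(n):
--
--
--     i = 1
--     while True:
--         if n < pow(2,i) and n >= pow(2,i-1):
--             return i
--         i += 1
--
-- def Solve(N):
--     level = cur(N)
--     s = 0
--     for i in range(1,pow(2,level)):
--         current_level = cur(i)
--         for j in range(current_level+1,level+1):
--             s += (j - current_level)*pow(2,(j - current_level))
--     return s % 1000000007
-- ===== SOURCE B (Python) =====
-- def Solve(N):
--     # Group the nodes of the full tree by level: the 2**(k-1) nodes at level k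
--     # all contribute the same inner sum, which has the closed form
--     # sum_{d=1}^{m} d*2**d = (m-1)*2**(m+1) + 2 with m = L - k.
--     L = N.bit_length()
--     total = 0
--     for k in range(1, L + 1):
--         m = L - k
--         total += 2 ** (k - 1) * ((m - 1) * 2 ** (m + 1) + 2)
--     return total % 1000000007
-- ===== Notes on version B (the rewrite author's own statement) =====
-- stated objective: faster
-- what changed: Instead of looping over every node i in [1, 2^level) and re-deriving its level with an inner while loop plus a per-node inner sum, B groups nodes by level and multiplies the closed-form per-level inner sum ((m-1)*2^(m+1)+2) by the node count 2^(k-1), one term per level.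
-- outside the precondition, e.g. on Solve(0): A does not finish within the time limit, B returns 0; on Solve(-3): A does not finish within the time limit, B returns 2
import Mathlib
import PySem

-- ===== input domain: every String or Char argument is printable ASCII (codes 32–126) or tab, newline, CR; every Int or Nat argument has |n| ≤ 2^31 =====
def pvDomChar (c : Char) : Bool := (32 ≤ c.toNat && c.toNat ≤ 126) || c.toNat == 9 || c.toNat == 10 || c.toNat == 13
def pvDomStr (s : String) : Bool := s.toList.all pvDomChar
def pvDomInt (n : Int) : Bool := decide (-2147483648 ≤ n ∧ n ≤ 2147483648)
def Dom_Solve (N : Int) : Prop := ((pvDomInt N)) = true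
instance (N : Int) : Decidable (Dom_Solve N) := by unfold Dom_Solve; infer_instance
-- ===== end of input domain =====

-- B groups the nodes by level and uses the closed-form per-level inner sum, one term per level
-- instead of one term per node; equivalence is proved for 1 ≤ N (Python A loops forever for N ≤ 0).

-- ===== PORT A =====
-- 'while True' loop of cur, transliterated with fuel: within Dom and Pre (1 ≤ N ≤ 2^31) the
-- Python loop always returns within 34 iterations, so fuel 64 is never exhausted there.
def curLoop (n : Int) (i : Nat) (fuel : Nat) : Int :=
  match fuel with
  | 0 => 0
  | fuel + 1 => if n < 2 ^ i ∧ 2 ^ (i - 1) ≤ n then (i : Int) else curLoop n (i + 1) fuel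

def cur (n : Int) : Int := curLoop n 1 64

def Solve (N : Int) : Int :=
  let level := cur N
  let s := (PySem.List.pyRange 1 (2 ^ level.toNat) 1).foldl (fun s i =>
      let cl := cur i
      (PySem.List.pyRange (cl + 1) (level + 1) 1).foldl
        (fun s j => s + (j - cl) * 2 ^ (j - cl).toNat) s) 0
  PySem.Int.mod s 1000000007

-- ===== PORT B =====
def Solve_alt (N : Int) : Int :=
  let L : Int := (PySem.Int.bitLength N : Nat)
  let total := (PySem.List.pyRange 1 (L + 1) 1).foldl (fun total k =>
      let m := L - k
      total + 2 ^ (k - 1).toNat * ((m - 1) * 2 ^ (m + 1).toNat + 2)) 0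
  PySem.Int.mod total 1000000007

-- ===== PRECONDITION & SPEC =====
-- Pre_ excludes N ≤ 0, where A's 'while True' loop in cur never terminates (A returns no value).
def Pre_Solve (N : Int) : Prop := 1 ≤ N
instance (N : Int) : Decidable (Pre_Solve N) := by unfold Pre_Solve; infer_instance
def pvWitness_Solve : Int := 7

def Spec_Solve (N : Int) (out : Int) : Prop := out = Solve_alt N
instance (N : Int) (out : Int) : Decidable (Spec_Solve N out) := by unfold Spec_Solve; infer_instance

-- ===== CLAIM (what is proved, stated in full; the proofs are below) =====
def Claim_equal_Solve : Prop := ∀ (N : Int), Dom_Solve N → Pre_Solve N → Spec_Solve N (Solve N)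

-- ===== LEMMAS AND PROOFS =====

-- sum_{d=1}^{m} d * 2^d
def innerSum : Nat → Int
  | 0 => 0
  | m + 1 => innerSum m + (m + 1) * 2 ^ (m + 1)

lemma innerSum_closed (m : Nat) : innerSum m = ((m : Int) - 1) * 2 ^ (m + 1) + 2 := by
  induction m with
  | zero => simp [innerSum]
  | succ m ih =>
      rw [innerSum, ih]
      push_cast
      ring

lemma curLoop_spec (n : Int) (k : Nat) (hlo : (2:Int) ^ k ≤ n) (hhi : n < 2 ^ (k + 1)) :
    ∀ fuel i, 1 ≤ i → i ≤ k + 1 → k + 1 < i + fuel → curLoop n i fuel = ((k : Int) + 1) := by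
  intro fuel
  induction fuel with
  | zero => intro i h1 h2 h3; omega
  | succ f ih =>
      intro i h1 h2 h3
      by_cases hik : i = k + 1
      · subst hik
        rw [curLoop, if_pos]
        · push_cast; ring
        · exact ⟨hhi, by simpa using hlo⟩
      · have hik' : i ≤ k := by omega
        rw [curLoop, if_neg]
        · exact ih (i + 1) (by omega) (by omega) (by omega)
        · rintro ⟨hlt, -⟩
          have : (2:Int) ^ i ≤ 2 ^ k := pow_le_pow_right₀ one_le_two hik'
          linarith

lemma cur_eq (n : Int) (k : Nat) (hk : k < 40) (hlo : (2:Int) ^ k ≤ n) (hhi : n < 2 ^ (k + 1)) :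
    cur n = ((k : Int) + 1) := by
  exact curLoop_spec n k hlo hhi 64 1 le_rfl (by omega) (by omega)

-- the inner j-loop equals s0 + innerSum (L - cl), unconditionally
lemma inner_loop (s0 cl L : Int) :
    (PySem.List.pyRange (cl + 1) (L + 1) 1).foldl
      (fun s j => s + (j - cl) * 2 ^ (j - cl).toNat) s0
    = s0 + innerSum (L - cl).toNat := by
  by_cases h : cl ≤ L
  · have hm : L + 1 = cl + ((L - cl).toNat : Int) + 1 := by omega
    rw [hm]
    generalize (L - cl).toNat = m
    induction m generalizing s0 with
    | zero => simp [innerSum]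
    | succ m ihm =>
        have hsplit := PySem.List.pyRange_one_succ_right (a := cl + 1) (b := cl + (m:Int) + 1)
          (by omega)
        have he : cl + ((m+1 : Nat) : Int) + 1 = (cl + (m:Int) + 1) + 1 := by push_cast; ring
        rw [he, hsplit, List.foldl_append, ihm]
        have ht : (cl + (m:Int) + 1 - cl).toNat = m + 1 := by omega
        simp only [List.foldl_cons, List.foldl_nil, ht, innerSum]
        ring
  · have h1 : PySem.List.pyRange (cl + 1) (L + 1) 1 = [] :=
      PySem.List.pyRange_one_eq_nil (by omega)
    have h2 : (L - cl).toNat = 0 := by omega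
    simp [h1, h2, innerSum]

-- the outer i-loop, grouped by blocks of constant level
lemma asum (M : Nat) (hM : M ≤ 33) :
    ∀ L, L ≤ M →
    ((PySem.List.pyRange 1 ((2:Int) ^ L) 1).map
        (fun i => innerSum ((M : Int) - cur i).toNat)).sum
    = ((List.range L).map (fun k => (2:Int) ^ k * innerSum (M - (k + 1)))).sum := by
  intro L
  induction L with
  | zero =>
      intro _
      simp
  | succ L ih =>
      intro hL1
      have h1 : (1:Int) ≤ 2 ^ L := by
        simpa using pow_le_pow_right₀ (by norm_num : (1:Int) ≤ 2) (Nat.zero_le L)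
      have h2 : (2:Int) ^ L ≤ 2 ^ (L + 1) :=
        pow_le_pow_right₀ (by norm_num) (by omega)
      rw [PySem.List.pyRange_one_append 1 ((2:Int) ^ L) ((2:Int) ^ (L + 1)) h1 h2,
        List.map_append, List.sum_append, ih (by omega), List.range_succ,
        List.map_append, List.sum_append]
      congr 1
      have hcur : ∀ i ∈ PySem.List.pyRange ((2:Int) ^ L) ((2:Int) ^ (L + 1)) 1,
          innerSum ((M : Int) - cur i).toNat = innerSum (M - (L + 1)) := by
        intro i hi
        rw [PySem.List.mem_pyRange_one] at hi
        rw [cur_eq i L (by omega) hi.1 hi.2]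
        congr 1
        omega
      rw [List.map_congr_left hcur, PySem.List.sum_map_const_int]
      have hd : (2:Int) ^ (L + 1) - 2 ^ L = ((2 ^ L : Nat) : Int) := by
        push_cast; rw [pow_succ]; ring
      rw [PySem.List.length_pyRange_one, hd, Int.toNat_natCast]
      simp

lemma bitLength_spec (N : Int) (h1 : 1 ≤ N) :
    1 ≤ PySem.Int.bitLength N ∧
    (2:Int) ^ (PySem.Int.bitLength N - 1) ≤ N ∧ N < 2 ^ PySem.Int.bitLength N := by
  have hne : N ≠ 0 := by omega
  have habs : (N.natAbs : Int) = N := by omega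
  have hlo := PySem.Int.two_pow_bitLength_le N hne
  have hhi := PySem.Int.lt_two_pow_bitLength N
  have h1 : 1 ≤ PySem.Int.bitLength N := by
    by_contra hc
    have : PySem.Int.bitLength N = 0 := by omega
    rw [this] at hhi
    omega
  refine ⟨h1, ?_, ?_⟩
  · calc (2:Int) ^ (PySem.Int.bitLength N - 1)
        = ((2 ^ (PySem.Int.bitLength N - 1) : Nat) : Int) := by push_cast; ring
      _ ≤ (N.natAbs : Int) := by exact_mod_cast hlo
      _ = N := habs
  · calc N = (N.natAbs : Int) := habs.symm
      _ < ((2 ^ PySem.Int.bitLength N : Nat) : Int) := by exact_mod_cast hhi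
      _ = 2 ^ PySem.Int.bitLength N := by push_cast; ring

-- ===== VERDICT (by name: the statement is the Claim_ definition above) =====
theorem Solve_spec : Claim_equal_Solve := by
  intro N hdom hpre
  have hpre' : (1:Int) ≤ N := hpre
  obtain ⟨hM1, hlo, hhi⟩ := bitLength_spec N hpre'
  have hNle : N ≤ 2147483648 := by
    simp only [Dom_Solve, pvDomInt, decide_eq_true_eq] at hdom
    exact hdom.2
  have hM33 : PySem.Int.bitLength N ≤ 32 := by
    by_contra hc
    have h32 : (2:Int) ^ 32 ≤ 2 ^ (PySem.Int.bitLength N - 1) :=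
      pow_le_pow_right₀ (by norm_num) (by omega)
    have : (2:Int) ^ 32 ≤ N := le_trans h32 hlo
    norm_num at this
    omega
  set M := PySem.Int.bitLength N with hMdef
  have hcurN : cur N = (M : Int) := by
    have hM' : M - 1 + 1 = M := by omega
    have := cur_eq N (M - 1) (by omega) hlo (by rw [hM']; exact hhi)
    rw [this]
    omega
  have htoNat : ((M : Int)).toNat = M := by omega
  show Solve N = Solve_alt N
  simp only [Solve, Solve_alt, ← hMdef, hcurN, htoNat]
  congr 1
  have hfun : (fun (s i : Int) =>
      (PySem.List.pyRange (cur i + 1) ((M : Int) + 1) 1).foldl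
        (fun s j => s + (j - cur i) * 2 ^ (j - cur i).toNat) s)
      = fun (s i : Int) => s + innerSum ((M : Int) - cur i).toNat := by
    funext s i
    exact inner_loop s (cur i) (M : Int)
  rw [hfun, PySem.List.foldl_add, PySem.List.foldl_add]
  rw [asum M (by omega) M le_rfl]
  congr 1
  rw [PySem.List.pyRange_one]
  have hM' : (((M : Int) + 1 - 1)).toNat = M := by omega
  rw [hM', List.map_map]
  refine congrArg List.sum (List.map_congr_left ?_)
  intro k hk
  rw [List.mem_range] at hk
  simp only [Function.comp_apply]
  have e1 : ((1:Int) + (k : Int) - 1).toNat = k := by omega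
  have e2 : ((M : Int) - (1 + (k : Int)) + 1).toNat = M - k := by omega
  have e3 : (M - (k + 1)) + 1 = M - k := by omega
  have e4 : ((M - (k + 1) : Nat) : Int) = (M : Int) - (k : Int) - 1 := by omega
  rw [innerSum_closed, e3, e4, e1, e2]
  ring
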